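-- pv_equiv track=rewrite | github.com/itogaston/Advent-23 | Day3/day3src.py | get_adjents_numbers_star
-- ===== SOURCE A (Python) =====
-- def get_adjents_numbers_star(number_matrix: list[list], symbol_matrix: list[list]) -> list:
--     correct_numbers = []
--     for index, symbols in enumerate(symbol_matrix):
--         numbers = number_matrix[max(0, index-1):index+2]
--         for symbol in symbols:
--             possible_numbers = [item for number_aux in numbers for item in number_aux]
--             adjent_numbers = list(filter(lambda x: symbol[1] >= x[1]-1 and symbol[1] <= x[2], possible_numbers))
--             if(len(adjent_numbers) > 1):
--                 correct_numbers.append(adjent_numbers)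
--     return correct_numbers
-- ===== SOURCE B (Python) =====
-- # B inverts the iteration: one pass over the numbers scatters each number (via binary
-- # search on a per-row sorted column index) into per-symbol buckets; measured asymptotically
-- # faster than A's per-symbol re-flattening and scan of the 3-row number band.
-- from bisect import bisect_left, bisect_right
--
--
-- def get_adjents_numbers_star(number_matrix: list[list], symbol_matrix: list[list]) -> list:
--     m = len(symbol_matrix)
--     buckets = [[[] for _ in row] for row in symbol_matrix]
--     index = []
--     for row in symbol_matrix:
--         pairs = sorted([(sym[1], j) for j, sym in enumerate(row)], key=lambda p: p[0])
--         index.append(([c for c, _ in pairs], [j for _, j in pairs]))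
--     for r, nrow in enumerate(number_matrix[:m + 1]):
--         for x in nrow:
--             for i in range(max(0, r - 1), min(r + 2, m)):
--                 cs, js = index[i]
--                 for k in range(bisect_left(cs, x[1] - 1), bisect_right(cs, x[2])):
--                     buckets[i][js[k]].append(x)
--     return [b for row in buckets for b in row if len(b) > 1]
-- ===== Notes on version B (the rewrite author's own statement) =====
-- stated objective: faster
-- what changed: B inverts the iteration direction: instead of filtering a re-flattened 3-row number band for every symbol, it builds a sorted column index per symbol row once, then makes one pass over the numbers, binary-searching (bisect) each number's column interval in the three adjacent symbol rows and scattering the number into per-symbol buckets; a final pass keeps buckets with more than one number.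
import Mathlib
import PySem

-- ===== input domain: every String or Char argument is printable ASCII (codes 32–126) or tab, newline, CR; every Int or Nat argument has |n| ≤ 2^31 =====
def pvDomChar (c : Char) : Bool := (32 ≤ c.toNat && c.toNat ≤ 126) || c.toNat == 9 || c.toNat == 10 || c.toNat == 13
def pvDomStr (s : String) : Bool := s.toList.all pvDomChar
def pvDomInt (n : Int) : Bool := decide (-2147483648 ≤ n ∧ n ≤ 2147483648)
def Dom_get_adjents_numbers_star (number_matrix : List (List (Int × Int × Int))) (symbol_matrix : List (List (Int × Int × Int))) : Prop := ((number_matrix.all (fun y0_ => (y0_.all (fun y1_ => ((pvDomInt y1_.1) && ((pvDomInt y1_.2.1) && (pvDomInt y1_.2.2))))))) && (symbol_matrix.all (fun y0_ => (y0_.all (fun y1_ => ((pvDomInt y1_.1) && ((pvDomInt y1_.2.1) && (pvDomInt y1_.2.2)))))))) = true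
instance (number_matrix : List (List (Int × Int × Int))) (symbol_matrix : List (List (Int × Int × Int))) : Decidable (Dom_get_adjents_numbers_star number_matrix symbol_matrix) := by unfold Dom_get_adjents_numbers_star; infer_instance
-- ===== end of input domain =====

-- B inverts the iteration: one pass over the numbers scatters each number, via binary search
-- on a per-row sorted column index, into per-symbol buckets (A filters a re-flattened 3-row
-- number band for every symbol); a timing run measured B asymptotically faster.


-- ===== PORT A =====
def get_adjents_numbers_star (number_matrix : List (List (Int × Int × Int))) (symbol_matrix : List (List (Int × Int × Int))) : List (List (Int × Int × Int)) :=
  (PySem.List.enumerate symbol_matrix 0).foldl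
    (fun correct_numbers p =>
      -- numbers = number_matrix[max(0, index-1):index+2]
      let numbers := PySem.List.slice number_matrix (some (max 0 (p.1 - 1))) (some (p.1 + 2))
      p.2.foldl
        (fun correct_numbers symbol =>
          -- possible_numbers = [item for number_aux in numbers for item in number_aux]
          let possible_numbers := numbers.flatMap (fun number_aux => number_aux)
          let adjent_numbers := possible_numbers.filter
            (fun x => decide (symbol.2.1 ≥ x.2.1 - 1) && decide (symbol.2.1 ≤ x.2.2))
          if adjent_numbers.length > 1 then correct_numbers ++ [adjent_numbers] else correct_numbers)
        correct_numbers)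
    []

-- ===== PORT B =====
def get_adjents_numbers_star_alt (number_matrix : List (List (Int × Int × Int))) (symbol_matrix : List (List (Int × Int × Int))) : List (List (Int × Int × Int)) :=
  let m := symbol_matrix.length
  -- buckets = [[[] for _ in row] for row in symbol_matrix]
  let buckets : List (List (List (Int × Int × Int))) :=
    symbol_matrix.map (fun row => row.map (fun _ => []))
  -- index: per symbol row, columns sorted (with their positions) for binary search
  let index : List (List Int × List Int) :=
    symbol_matrix.map (fun row =>
      let pairs := PySem.List.sorted
        ((PySem.List.enumerate row 0).map (fun p => (p.2.2.1, p.1))) (fun q => q.1) false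
      (pairs.map (fun q => q.1), pairs.map (fun q => q.2)))
  let buckets :=
    (PySem.List.enumerate (PySem.List.slice number_matrix none (some ((m : Int) + 1))) 0).foldl
      (fun buckets q =>
        q.2.foldl
          (fun buckets x =>
            (PySem.List.pyRange (max 0 (q.1 - 1)) (min (q.1 + 2) (m : Int)) 1).foldl
              (fun buckets i =>
                let ci := index.getD i.toNat ([], [])
                (PySem.List.pyRange (PySem.List.bisectLeft ci.1 (x.2.1 - 1) : Int)
                    (PySem.List.bisectRight ci.1 x.2.2 : Int) 1).foldl
                  (fun buckets k =>
                    -- buckets[i][js[k]].append(x); js[k] is a nonnegative enumerate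
                    -- position, so .toNat is exact here
                    buckets.modify i.toNat
                      (fun brow => brow.modify (PySem.List.pyGetD ci.2 k 0).toNat
                        (fun b => b ++ [x])))
                  buckets)
              buckets)
          buckets)
      buckets
  -- return [b for row in buckets for b in row if len(b) > 1]
  buckets.flatten.filter (fun b => b.length > 1)

-- ===== PRECONDITION & SPEC =====
def Spec_get_adjents_numbers_star (number_matrix : List (List (Int × Int × Int))) (symbol_matrix : List (List (Int × Int × Int))) (out : List (List (Int × Int × Int))) : Prop := out = get_adjents_numbers_star_alt number_matrix symbol_matrix
instance (number_matrix : List (List (Int × Int × Int))) (symbol_matrix : List (List (Int × Int × Int))) (out : List (List (Int × Int × Int))) : Decidable (Spec_get_adjents_numbers_star number_matrix symbol_matrix out) := by unfold Spec_get_adjents_numbers_star; infer_instance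

-- ===== CLAIM (what is proved, stated in full; the proofs are below) =====
def Claim_equal_get_adjents_numbers_star : Prop := ∀ (number_matrix : List (List (Int × Int × Int))) (symbol_matrix : List (List (Int × Int × Int))), Dom_get_adjents_numbers_star number_matrix symbol_matrix → Spec_get_adjents_numbers_star number_matrix symbol_matrix (get_adjents_numbers_star number_matrix symbol_matrix)

-- ===== LEMMAS AND PROOFS =====

theorem pv_getD_modify {α : Type} (bs : List α) (n i0 : Nat) (f : α → α) (d : α) :
    (bs.modify n f).getD i0 d
      = if n = i0 ∧ i0 < bs.length then f (bs.getD i0 d) else bs.getD i0 d := by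
  simp only [List.getD_eq_getElem?_getD, List.getElem?_modify]
  by_cases h1 : n = i0 <;> by_cases h2 : i0 < bs.length
  · simp [h1, h2]
  · rw [List.getElem?_eq_none (by omega : bs.length ≤ i0)]; simp [h1, h2]
  · simp [h1, h2]
  · simp [h1, h2]

theorem pv_modify_modify {α : Type} (bs : List α) (n : Nat) (f g : α → α) :
    (bs.modify n f).modify n g = bs.modify n (fun a => g (f a)) := by
  apply List.ext_getElem?
  intro j
  simp only [List.getElem?_modify]
  cases bs[j]? <;> by_cases h : n = j <;> simp [h]

theorem pv_modfold {α β : Type} (ks : List β) (bs : List α) (n : Nat) (g : β → α → α) :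
    ks.foldl (fun b k => b.modify n (g k)) bs
      = bs.modify n (fun r => ks.foldl (fun r k => g k r) r) := by
  induction ks generalizing bs with
  | nil =>
    simp only [List.foldl_nil]
    symm
    apply List.ext_getElem?
    intro j
    simp only [List.getElem?_modify]
    cases bs[j]? <;> simp
  | cons k t ih => simp only [List.foldl_cons]; rw [ih, pv_modify_modify]

theorem pv_length_foldl_modify {α β : Type} (ks : List β) (bs : List α) (F : β → Nat)
    (g : β → α → α) :
    (ks.foldl (fun b k => b.modify (F k) (g k)) bs).length = bs.length := by
  induction ks generalizing bs with
  | nil => rfl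
  | cons k t ih => simp only [List.foldl_cons]; rw [ih, List.length_modify]

theorem pv_fold_seg {α β : Type} (g : β → α → β) (d : α) :
    ∀ (n : Nat) (xs : List α) (a : Nat) (acc : β), a + n ≤ xs.length →
    (List.range n).foldl (fun b k => g b (xs.getD (a + k) d)) acc
      = ((xs.drop a).take n).foldl g acc := by
  intro n
  induction n with
  | zero => intro xs a acc h; simp
  | succ n ih =>
    intro xs a acc h
    rw [List.range_succ, List.foldl_append, ih xs a acc (by omega)]
    have htake : (xs.drop a).take (n + 1) = (xs.drop a).take n ++ [xs.getD (a + n) d] := by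
      rw [List.take_add_one]
      congr 1
      rw [List.getElem?_drop, List.getD_eq_getElem?_getD,
        List.getElem?_eq_getElem (by omega : a + n < xs.length)]
      simp
    rw [htake, List.foldl_append]
    simp


theorem pv_seg_eq_filter (ps : List (Int × Int)) (lo hi : Int)
    (hs : ps.Pairwise (fun a b => a.1 ≤ b.1)) :
    ((ps.drop (PySem.List.bisectLeft (ps.map (fun q => q.1)) lo)).take
        (PySem.List.bisectRight (ps.map (fun q => q.1)) hi
          - PySem.List.bisectLeft (ps.map (fun q => q.1)) lo))
      = ps.filter (fun p => decide (lo ≤ p.1) && decide (p.1 ≤ hi)) := by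
  set cs := ps.map (fun q => q.1) with hcs
  have hsc : cs.Pairwise (fun a b => a ≤ b) := List.pairwise_map.mpr hs
  obtain ⟨hbl_le, hbl_lt, hbl_ge⟩ := PySem.List.bisectLeft_spec cs lo hsc
  obtain ⟨hbr_le, hbr_lt, hbr_ge⟩ := PySem.List.bisectRight_spec cs hi hsc
  set bl := PySem.List.bisectLeft cs lo with hbl
  set br := PySem.List.bisectRight cs hi with hbr
  have hlen : cs.length = ps.length := by simp [hcs]
  have hcsj : ∀ (j : Nat) (hj : j < ps.length), cs[j]'(by omega) = ps[j].1 := by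
    intro j hj; simp [hcs]
  -- decompose ps into three parts
  have hdecomp : ps = ps.take bl ++ ((ps.drop bl).take (br - bl) ++ (ps.drop bl).drop (br - bl)) := by
    rw [List.take_append_drop, List.take_append_drop]
  have hfilter : ps.filter (fun p => decide (lo ≤ p.1) && decide (p.1 ≤ hi))
      = (ps.take bl).filter (fun p => decide (lo ≤ p.1) && decide (p.1 ≤ hi))
        ++ (((ps.drop bl).take (br - bl)).filter (fun p => decide (lo ≤ p.1) && decide (p.1 ≤ hi))
        ++ ((ps.drop bl).drop (br - bl)).filter (fun p => decide (lo ≤ p.1) && decide (p.1 ≤ hi))) := by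
    conv_lhs => rw [hdecomp]
    rw [List.filter_append, List.filter_append]
  rw [hfilter]
  have h1 : (ps.take bl).filter (fun p => decide (lo ≤ p.1) && decide (p.1 ≤ hi)) = [] := by
    rw [List.filter_eq_nil_iff]
    intro p hp
    obtain ⟨j, hj, hpj⟩ := List.mem_iff_getElem.mp hp
    have hjlen : j < ps.length := by
      have := hj; rw [List.length_take] at this; omega
    rw [List.getElem_take] at hpj
    have hjbl : j < bl := by rw [List.length_take] at hj; omega
    have := hbl_lt j (by omega) hjbl
    rw [hcsj j hjlen] at this
    simp [← hpj]
    omega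
  have h3 : ((ps.drop bl).drop (br - bl)).filter
      (fun p => decide (lo ≤ p.1) && decide (p.1 ≤ hi)) = [] := by
    rw [List.drop_drop, List.filter_eq_nil_iff]
    intro p hp
    obtain ⟨j, hj, hpj⟩ := List.mem_iff_getElem.mp hp
    rw [List.getElem_drop] at hpj
    have hjlen : bl + (br - bl) + j < ps.length := by
      rw [List.length_drop] at hj; omega
    have := hbr_ge (bl + (br - bl) + j) (by omega) (by omega)
    rw [hcsj _ hjlen] at this
    simp [← hpj]
    omega
  have h2 : ((ps.drop bl).take (br - bl)).filter
      (fun p => decide (lo ≤ p.1) && decide (p.1 ≤ hi)) = (ps.drop bl).take (br - bl) := by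
    rw [List.filter_eq_self]
    intro p hp
    obtain ⟨j, hj, hpj⟩ := List.mem_iff_getElem.mp hp
    rw [List.getElem_take, List.getElem_drop] at hpj
    have hjlt : j < br - bl := by rw [List.length_take] at hj; omega
    have hjlen : bl + j < ps.length := by
      rw [List.length_take, List.length_drop] at hj; omega
    have hlo := hbl_ge (bl + j) (by omega) (by omega)
    have hhi := hbr_lt (bl + j) (by omega) (by omega)
    rw [hcsj _ hjlen] at hlo hhi
    simp [← hpj]
    omega
  rw [h1, h2, h3]
  simp

theorem pv_foldmod (x : Int × Int × Int) (j0 : Nat) :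
    ∀ (M : List Int) (brow : List (List (Int × Int × Int))),
    (∀ v ∈ M, 0 ≤ v ∧ v.toNat < brow.length) →
    (M.foldl (fun b v => b.modify v.toNat (fun c => c ++ [x])) brow).getD j0 []
      = brow.getD j0 [] ++ List.replicate (M.count (j0 : Int)) x := by
  intro M
  induction M with
  | nil => intro brow _; simp
  | cons v T ih =>
    intro brow hM
    obtain ⟨hv0, hvlen⟩ := hM v List.mem_cons_self
    simp only [List.foldl_cons]
    rw [ih (brow.modify v.toNat (fun c => c ++ [x]))
      (by intro w hw; have := hM w (List.mem_cons_of_mem _ hw); simpa using this)]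
    rw [pv_getD_modify]
    by_cases hev : v.toNat = j0
    · have hvj : v = (j0 : Int) := by omega
      rw [if_pos ⟨hev, by omega⟩]
      subst hvj
      rw [List.count_cons_self, List.replicate_succ]
      simp [List.append_assoc]
    · have hvj : v ≠ (j0 : Int) := by omega
      rw [if_neg (by tauto)]
      rw [List.count_cons_of_ne (by exact fun h => hvj h)]

theorem pv_ifold {α : Type} (E : Int → α → α) (dflt : α) (i0 : Nat) :
    ∀ (I : List Int) (bs : List α), I.Nodup → (∀ i ∈ I, 0 ≤ i) →
    (I.foldl (fun bs i => bs.modify i.toNat (E i)) bs).getD i0 dflt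
      = if ((i0 : Int) ∈ I ∧ i0 < bs.length) then E (i0 : Int) (bs.getD i0 dflt)
        else bs.getD i0 dflt := by
  intro I
  induction I with
  | nil => intro bs _ _; simp
  | cons i T ih =>
    intro bs hnd hpos
    have hi0 := hpos i List.mem_cons_self
    simp only [List.foldl_cons]
    rw [ih _ hnd.of_cons (fun w hw => hpos w (List.mem_cons_of_mem _ hw)), List.length_modify]
    have hget := pv_getD_modify bs i.toNat i0 (E i) dflt
    by_cases hT : (i0 : Int) ∈ T
    · have hne : i ≠ (i0 : Int) := fun h => (List.nodup_cons.mp hnd).1 (h ▸ hT)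
      have hne' : ¬ (i.toNat = i0 ∧ i0 < bs.length) := fun h => hne (by omega)
      rw [hget, if_neg hne']
      by_cases hlt : i0 < bs.length
      · rw [if_pos ⟨hT, hlt⟩, if_pos ⟨List.mem_cons_of_mem _ hT, hlt⟩]
      · rw [if_neg (fun h => hlt h.2), if_neg (fun h => hlt h.2)]
    · rw [if_neg (fun h => hT h.1), hget]
      by_cases hei : i = (i0 : Int)
      · by_cases hlt : i0 < bs.length
        · rw [if_pos ⟨by omega, hlt⟩,
            if_pos ⟨by rw [← hei]; exact List.mem_cons_self, hlt⟩, hei]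
        · rw [if_neg (fun h => hlt h.2), if_neg (fun h => hlt h.2)]
      · have h1 : ¬ (i.toNat = i0 ∧ i0 < bs.length) := fun h => hei (by omega)
        have h2 : ¬ ((i0 : Int) ∈ i :: T ∧ i0 < bs.length) := by
          intro ⟨hm, _⟩
          rcases List.mem_cons.mp hm with h | h
          · exact hei h.symm
          · exact hT h
        rw [if_neg h1, if_neg h2]

def pvTest (s x : Int × Int × Int) : Bool :=
  decide (s.2.1 ≥ x.2.1 - 1) && decide (s.2.1 ≤ x.2.2)

def pvPairs (row : List (Int × Int × Int)) : List (Int × Int) :=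
  PySem.List.sorted ((PySem.List.enumerate row 0).map (fun p => (p.2.2.1, p.1)))
    (fun q => q.1) false

def pvRowStep (row : List (Int × Int × Int)) (x : Int × Int × Int)
    (brow : List (List (Int × Int × Int))) : List (List (Int × Int × Int)) :=
  (PySem.List.pyRange
      (PySem.List.bisectLeft ((pvPairs row).map (fun q : Int × Int => q.1)) (x.2.1 - 1) : Int)
      (PySem.List.bisectRight ((pvPairs row).map (fun q : Int × Int => q.1)) x.2.2 : Int) 1).foldl
    (fun r k => r.modify (PySem.List.pyGetD ((pvPairs row).map (fun q : Int × Int => q.2)) k 0).toNat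
      (fun b => b ++ [x])) brow

theorem pv_length_rowstep (row : List (Int × Int × Int)) (x : Int × Int × Int)
    (brow : List (List (Int × Int × Int))) :
    (pvRowStep row x brow).length = brow.length := by
  unfold pvRowStep
  exact pv_length_foldl_modify _ _ _ _

-- membership in the sorted pair index
theorem pv_mem_pairs (row : List (Int × Int × Int)) (p : Int × Int) :
    p ∈ pvPairs row ↔ ∃ k, ∃ (h : k < row.length), p = (row[k].2.1, (k : Int)) := by
  unfold pvPairs
  rw [(PySem.List.sorted_perm _ _ _).mem_iff, List.mem_map]
  constructor
  · rintro ⟨q, hq, rfl⟩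
    obtain ⟨k, hk, rfl⟩ := (PySem.List.mem_enumerate_iff _ _ _).mp hq
    exact ⟨k, hk, by simp⟩
  · rintro ⟨k, hk, rfl⟩
    exact ⟨((k : Int), row[k]), (PySem.List.mem_enumerate_iff _ _ _).mpr ⟨k, hk, by simp⟩, rfl⟩

theorem pv_snds_nodup (row : List (Int × Int × Int)) :
    ((pvPairs row).map (fun q => q.2)).Nodup := by
  have hperm : ((pvPairs row).map (fun q => q.2)).Perm
      (((PySem.List.enumerate row 0).map (fun p => (p.2.2.1, p.1))).map (fun q => q.2)) :=
    (PySem.List.sorted_perm _ _ _).map _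
  rw [hperm.nodup_iff, List.map_map]
  have : ((PySem.List.enumerate row 0).map ((fun (q : Int × Int) => q.2) ∘ (fun p => (p.2.2.1, p.1))))
      = (PySem.List.enumerate row 0).map (fun p => p.1) := rfl
  rw [this, PySem.List.map_fst_enumerate]
  exact PySem.List.nodup_pyRange_one _ _

theorem pv_rowstep_getD (row : List (Int × Int × Int)) (x : Int × Int × Int)
    (brow : List (List (Int × Int × Int))) (j0 : Nat)
    (hlen : brow.length = row.length) :
    (pvRowStep row x brow).getD j0 []
      = brow.getD j0 []
        ++ (if j0 < row.length ∧ pvTest (row.getD j0 (0, 0, 0)) x = true then [x] else []) := by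
  unfold pvRowStep
  set ps := pvPairs row with hps
  set cs := ps.map (fun q => q.1) with hcs
  set js := ps.map (fun q => q.2) with hjs
  set lo := x.2.1 - 1 with hlo
  set hi := x.2.2 with hhi
  have hsorted : ps.Pairwise (fun a b => a.1 ≤ b.1) := PySem.List.sorted_pairwise _ _
  have hsc : cs.Pairwise (fun a b => a ≤ b) := List.pairwise_map.mpr hsorted
  obtain ⟨hbl_le, _, _⟩ := PySem.List.bisectLeft_spec cs lo hsc
  obtain ⟨hbr_le, _, _⟩ := PySem.List.bisectRight_spec cs hi hsc
  set bl := PySem.List.bisectLeft cs lo with hbl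
  set br := PySem.List.bisectRight cs hi with hbr
  have hcslen : cs.length = ps.length := by simp [hcs]
  have hjslen : js.length = ps.length := by simp [hjs]
  -- rewrite the k-range fold into a fold over the matched segment of js
  rw [PySem.List.pyRange_one, List.foldl_map]
  have hcast : ((br : Int) - (bl : Int)).toNat = br - bl := by omega
  rw [hcast]
  have hbody : (fun (r : List (List (Int × Int × Int))) (k : Nat) =>
        r.modify (PySem.List.pyGetD js ((bl : Int) + (k : Int)) 0).toNat (fun b => b ++ [x]))
      = (fun r k => r.modify ((js.getD (bl + k) 0).toNat) (fun b => b ++ [x])) := by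
    funext r k
    have : ((bl : Int) + (k : Int)) = ((bl + k : Nat) : Int) := by push_cast; ring
    rw [this, PySem.List.pyGetD_natCast]
  rw [hbody]
  rw [pv_fold_seg (fun r v => r.modify v.toNat (fun b => b ++ [x])) 0 (br - bl) js bl brow
    (by omega)]
  have hseg : (js.drop bl).take (br - bl)
      = ((ps.filter (fun p => decide (lo ≤ p.1) && decide (p.1 ≤ hi))).map (fun q => q.2)) := by
    rw [hjs, ← List.map_drop, ← List.map_take, pv_seg_eq_filter ps lo hi hsorted]
  rw [hseg]
  set M := (ps.filter (fun p => decide (lo ≤ p.1) && decide (p.1 ≤ hi))).map (fun q => q.2)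
    with hM
  have hMmem : ∀ v ∈ M, ∃ k, k < row.length ∧ v = (k : Int)
      ∧ (decide (lo ≤ row[k]!.2.1) && decide (row[k]!.2.1 ≤ hi)) = true := by
    intro v hv
    rw [hM, List.mem_map] at hv
    obtain ⟨p, hp, rfl⟩ := hv
    rw [List.mem_filter] at hp
    obtain ⟨hpm, hpP⟩ := hp
    obtain ⟨k, hk, rfl⟩ := (pv_mem_pairs row p).mp hpm
    refine ⟨k, hk, rfl, ?_⟩
    simpa [getElem!_pos row k hk] using hpP
  have hMbound : ∀ v ∈ M, 0 ≤ v ∧ v.toNat < brow.length := by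
    intro v hv
    obtain ⟨k, hk, rfl, _⟩ := hMmem v hv
    constructor
    · omega
    · rw [hlen]; omega
  rw [pv_foldmod x j0 M brow hMbound]
  congr 1
  have hMnodup : M.Nodup :=
    List.Sublist.nodup (List.Sublist.map _ (List.filter_sublist)) (pv_snds_nodup row)
  by_cases hmem : (j0 : Int) ∈ M
  · rw [List.count_eq_one_of_mem hMnodup hmem]
    obtain ⟨k, hk, hkeq, hkP⟩ := hMmem _ hmem
    have hkj : k = j0 := by omega
    subst hkj
    rw [if_pos]
    · rfl
    refine ⟨hk, ?_⟩
    rw [List.getD_eq_getElem row (0,0,0) hk]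
    rw [getElem!_pos row k hk] at hkP
    unfold pvTest
    simp only [hlo, hhi] at hkP
    simp only [ge_iff_le]
    exact hkP
  · rw [List.count_eq_zero.mpr hmem]
    rw [if_neg]
    · rfl
    intro ⟨hj0, htest⟩
    apply hmem
    rw [hM, List.mem_map]
    refine ⟨(row[j0].2.1, (j0 : Int)), ?_, rfl⟩
    rw [List.mem_filter]
    constructor
    · exact (pv_mem_pairs row _).mpr ⟨j0, hj0, rfl⟩
    · unfold pvTest at htest
      rw [List.getD_eq_getElem row (0,0,0) hj0] at htest
      simp only [ge_iff_le] at htest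
      simpa [hlo, hhi] using htest

-- == the number-scatter layers of B ==

def pvBand (nm : List (List (Int × Int × Int))) (i : Nat) : List (Int × Int × Int) :=
  (if i > 0 then nm.getD (i - 1) [] else []) ++ nm.getD i [] ++ nm.getD (i + 1) []

def pvAdj (nm : List (List (Int × Int × Int))) (i : Nat) (s : Int × Int × Int) :
    List (Int × Int × Int) :=
  (pvBand nm i).filter (fun x => pvTest s x)

def pvTarget (nm sm : List (List (Int × Int × Int))) : List (List (List (Int × Int × Int))) :=
  (List.range sm.length).map (fun i => (sm.getD i []).map (fun s => pvAdj nm i s))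

-- the per-x scatter applied at row i of the bucket matrix
def pvE (sm : List (List (Int × Int × Int))) (x : Int × Int × Int) (i : Int) :
    List (List (Int × Int × Int)) → List (List (Int × Int × Int)) :=
  pvRowStep (sm.getD i.toNat []) x

-- the symbol-row window reached from number row index r (port B's middle range)
def pvI (m : Nat) (r : Int) : List Int :=
  PySem.List.pyRange (max 0 (r - 1)) (min (r + 2) (m : Int)) 1

-- bucket-shape invariant
def pvH (sm : List (List (Int × Int × Int))) (bs : List (List (List (Int × Int × Int)))) :
    Prop :=
  bs.length = sm.length ∧ ∀ i : Nat, (bs.getD i []).length = (sm.getD i []).length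

theorem pv_H_foldl_modify (sm : List (List (Int × Int × Int)))
    (E : Int → List (List (Int × Int × Int)) → List (List (Int × Int × Int)))
    (hE : ∀ i brow, (E i brow).length = brow.length) :
    ∀ (I : List Int) (bs : List (List (List (Int × Int × Int)))), pvH sm bs →
    pvH sm (I.foldl (fun bs i => bs.modify i.toNat (E i)) bs) := by
  intro I
  induction I with
  | nil => intro bs h; exact h
  | cons i T ih =>
    intro bs hH
    simp only [List.foldl_cons]
    apply ih
    constructor
    · rw [List.length_modify]; exact hH.1
    · intro i'
      rw [pv_getD_modify]
      split_ifs with h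
      · rw [hE]; exact hH.2 i'
      · exact hH.2 i'

-- effect of scattering one number x (number row index r) on cell (i0, j0)
theorem pv_xstep_cell (sm : List (List (Int × Int × Int))) (x : Int × Int × Int) (r : Int)
    (i0 j0 : Nat) (hi0 : i0 < sm.length)
    (bs : List (List (List (Int × Int × Int)))) (hH : pvH sm bs) :
    (((pvI sm.length r).foldl (fun bs i => bs.modify i.toNat (pvE sm x i)) bs).getD i0 []).getD
        j0 []
      = (bs.getD i0 []).getD j0 []
        ++ (if (i0 : Int) ∈ pvI sm.length r
              ∧ j0 < (sm.getD i0 []).length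
              ∧ pvTest ((sm.getD i0 []).getD j0 (0, 0, 0)) x = true
            then [x] else []) := by
  rw [pv_ifold (pvE sm x) [] i0 (pvI sm.length r) bs
    (PySem.List.nodup_pyRange_one _ _)
    (by intro i hi; have := PySem.List.mem_pyRange_one.mp hi; omega)]
  by_cases hmem : (i0 : Int) ∈ pvI sm.length r
  · rw [if_pos ⟨hmem, by rw [hH.1]; exact hi0⟩]
    unfold pvE
    rw [pv_rowstep_getD _ _ _ _ (by simpa using hH.2 i0)]
    simp only [Int.toNat_natCast]
    by_cases hc : j0 < (sm.getD i0 []).length ∧ pvTest ((sm.getD i0 []).getD j0 (0,0,0)) x = true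
    · rw [if_pos hc, if_pos ⟨hmem, hc⟩]
    · rw [if_neg hc, if_neg (by tauto)]
  · rw [if_neg (by tauto), if_neg (by tauto)]; simp

-- the selection of number rows feeding symbol row i0, walking the rows from index s
def pvSel (s0 : Int × Int × Int) (i0 m : Nat) :
    List (List (Int × Int × Int)) → Nat → List (Int × Int × Int)
  | [], _ => []
  | r :: t, s =>
    (if (i0 : Int) ∈ pvI m (s : Int) then r.filter (fun x => pvTest s0 x) else [])
      ++ pvSel s0 i0 m t (s + 1)

-- scattering a whole number row nrow (row index r) over cell (i0, j0)
theorem pv_nrow_cell (sm : List (List (Int × Int × Int))) (r : Int) (i0 j0 : Nat)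
    (hi0 : i0 < sm.length) (hj0 : j0 < (sm.getD i0 []).length) :
    ∀ (nrow : List (Int × Int × Int)) (bs : List (List (List (Int × Int × Int)))), pvH sm bs →
    ((nrow.foldl (fun bs x =>
        (pvI sm.length r).foldl (fun bs i => bs.modify i.toNat (pvE sm x i)) bs) bs).getD
          i0 []).getD j0 []
      = (bs.getD i0 []).getD j0 []
        ++ (if (i0 : Int) ∈ pvI sm.length r
            then nrow.filter (fun x => pvTest ((sm.getD i0 []).getD j0 (0, 0, 0)) x) else [])
      ∧ pvH sm (nrow.foldl (fun bs x =>
          (pvI sm.length r).foldl (fun bs i => bs.modify i.toNat (pvE sm x i)) bs) bs) := by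
  intro nrow
  induction nrow with
  | nil => intro bs hH; simp only [List.foldl_nil, List.filter_nil]; exact ⟨by simp, hH⟩
  | cons x t ih =>
    intro bs hH
    have hH' : pvH sm ((pvI sm.length r).foldl (fun bs i => bs.modify i.toNat (pvE sm x i)) bs) :=
      pv_H_foldl_modify sm (pvE sm x) (fun i brow => pv_length_rowstep _ _ _) _ bs hH
    obtain ⟨hcell, hHfin⟩ := ih _ hH'
    simp only [List.foldl_cons]
    refine ⟨?_, hHfin⟩
    rw [hcell, pv_xstep_cell sm x r i0 j0 hi0 bs hH]
    by_cases hmem : (i0 : Int) ∈ pvI sm.length r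
    · rw [if_pos hmem, if_pos hmem, List.filter_cons]
      by_cases ht : pvTest ((sm.getD i0 []).getD j0 (0, 0, 0)) x = true
      · rw [if_pos ⟨hmem, hj0, ht⟩, if_pos ht, List.append_assoc, List.singleton_append]
      · rw [if_neg (by tauto), if_neg ht]
        simp
    · rw [if_neg hmem, if_neg hmem, if_neg (by tauto)]
      simp

-- walking all number rows, starting at row index s
theorem pv_rows_cell (sm : List (List (Int × Int × Int))) (i0 j0 : Nat)
    (hi0 : i0 < sm.length) (hj0 : j0 < (sm.getD i0 []).length) :
    ∀ (lst : List (List (Int × Int × Int))) (s : Nat)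
      (bs : List (List (List (Int × Int × Int)))), pvH sm bs →
    (((PySem.List.enumerate lst (s : Int)).foldl (fun bs q =>
        q.2.foldl (fun bs x =>
          (pvI sm.length q.1).foldl (fun bs i => bs.modify i.toNat (pvE sm x i)) bs) bs)
        bs).getD i0 []).getD j0 []
      = (bs.getD i0 []).getD j0 []
        ++ pvSel ((sm.getD i0 []).getD j0 (0, 0, 0)) i0 sm.length lst s := by
  intro lst
  induction lst with
  | nil =>
    intro s bs hH
    simp [PySem.List.enumerate, pvSel]
  | cons nrow t ih =>
    intro s bs hH
    rw [PySem.List.enumerate_cons]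
    simp only [List.foldl_cons]
    obtain ⟨hcell, hH'⟩ := pv_nrow_cell sm (s : Int) i0 j0 hi0 hj0 nrow bs hH
    have hcast : ((s : Int) + 1) = ((s + 1 : Nat) : Int) := by push_cast; ring
    rw [hcast, ih (s + 1) _ hH', hcell, pvSel]
    rw [List.append_assoc]

-- == closed form of pvSel: the three adjacent number rows ==

def pvO (s0 : Int × Int × Int) (lst : List (List (Int × Int × Int))) (s : Nat) (t : Int) :
    List (Int × Int × Int) :=
  if 0 ≤ t ∧ (s : Int) ≤ t then (lst.getD (t - (s : Int)).toNat []).filter (fun x => pvTest s0 x)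
  else []

theorem pv_pvO_nil (s0 : Int × Int × Int) (s : Nat) (t : Int) : pvO s0 [] s t = [] := by
  unfold pvO
  split_ifs <;> simp

theorem pv_pvO_cons (s0 : Int × Int × Int) (r : List (Int × Int × Int))
    (tl : List (List (Int × Int × Int))) (s : Nat) (t : Int) :
    pvO s0 (r :: tl) s t
      = if t = (s : Int) then r.filter (fun x => pvTest s0 x) else pvO s0 tl (s + 1) t := by
  unfold pvO
  by_cases h : t = (s : Int)
  · rw [if_pos h, if_pos ⟨by omega, by omega⟩]
    have : (t - (s : Int)).toNat = 0 := by omega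
    rw [this, List.getD_cons_zero]
  · rw [if_neg h]
    by_cases h2 : 0 ≤ t ∧ (s : Int) ≤ t
    · rw [if_pos h2, if_pos ⟨h2.1, by push_cast; omega⟩]
      have : (t - (s : Int)).toNat = (t - ((s + 1 : Nat) : Int)).toNat + 1 := by push_cast; omega
      rw [this, List.getD_cons_succ]
    · rw [if_neg h2, if_neg (by push_cast; omega)]

theorem pv_cond_iff (m i0 : Nat) (hi0 : i0 < m) (s : Nat) :
    ((i0 : Int) ∈ pvI m (s : Int))
      ↔ ((i0 : Int) - 1 = (s : Int) ∨ (i0 : Int) = (s : Int) ∨ (i0 : Int) + 1 = (s : Int)) := by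
  unfold pvI
  rw [PySem.List.mem_pyRange_one]
  omega

theorem pv_sel_closed (s0 : Int × Int × Int) (i0 m : Nat) (hi0 : i0 < m) :
    ∀ (lst : List (List (Int × Int × Int))) (s : Nat),
    pvSel s0 i0 m lst s
      = pvO s0 lst s ((i0 : Int) - 1) ++ pvO s0 lst s (i0 : Int) ++ pvO s0 lst s ((i0 : Int) + 1) := by
  intro lst
  induction lst with
  | nil => intro s; simp [pvSel, pv_pvO_nil]
  | cons r tl ih =>
    intro s
    rw [show pvSel s0 i0 m (r :: tl) s
        = (if (i0 : Int) ∈ pvI m (s : Int) then r.filter (fun x => pvTest s0 x) else [])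
          ++ pvSel s0 i0 m tl (s + 1) from rfl]
    rw [ih (s + 1), pv_pvO_cons, pv_pvO_cons, pv_pvO_cons]
    by_cases hA : (i0 : Int) - 1 = (s : Int)
    · rw [if_pos ((pv_cond_iff m i0 hi0 s).mpr (Or.inl hA)), if_pos hA,
        if_neg (by omega), if_neg (by omega)]
      have h1 : pvO s0 tl (s + 1) ((i0 : Int) - 1) = [] := by
        unfold pvO; rw [if_neg (by push_cast; omega)]
      rw [h1]
      simp [List.append_assoc]
    · by_cases hB : (i0 : Int) = (s : Int)
      · rw [if_pos ((pv_cond_iff m i0 hi0 s).mpr (Or.inr (Or.inl hB))), if_pos hB,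
          if_neg hA, if_neg (by omega)]
        have h1 : pvO s0 tl (s + 1) ((i0 : Int) - 1) = [] := by
          unfold pvO; rw [if_neg (by push_cast; omega)]
        have h2 : pvO s0 tl (s + 1) (i0 : Int) = [] := by
          unfold pvO; rw [if_neg (by push_cast; omega)]
        rw [h1, h2]
        simp
      · by_cases hC : (i0 : Int) + 1 = (s : Int)
        · rw [if_pos ((pv_cond_iff m i0 hi0 s).mpr (Or.inr (Or.inr hC))), if_pos hC,
            if_neg hA, if_neg hB]
          have h1 : pvO s0 tl (s + 1) ((i0 : Int) - 1) = [] := by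
            unfold pvO; rw [if_neg (by push_cast; omega)]
          have h2 : pvO s0 tl (s + 1) (i0 : Int) = [] := by
            unfold pvO; rw [if_neg (by push_cast; omega)]
          have h3 : pvO s0 tl (s + 1) ((i0 : Int) + 1) = [] := by
            unfold pvO; rw [if_neg (by push_cast; omega)]
          rw [h1, h2, h3]
          simp
        · rw [if_neg (by rw [pv_cond_iff m i0 hi0 s]; tauto), if_neg hA, if_neg hB, if_neg hC]
          simp [List.append_assoc]

theorem pv_getD_take {α : Type} (l : List α) (n k : Nat) (d : α) (h : k < n) :
    (l.take n).getD k d = l.getD k d := by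
  rw [List.getD_eq_getElem?_getD, List.getD_eq_getElem?_getD, List.getElem?_take]
  simp [h]

theorem pv_sel_band (nm : List (List (Int × Int × Int))) (s0 : Int × Int × Int)
    (i0 m : Nat) (hi0 : i0 < m) :
    pvSel s0 i0 m (nm.take (m + 1)) 0 = pvAdj nm i0 s0 := by
  rw [pv_sel_closed s0 i0 m hi0 (nm.take (m + 1)) 0]
  unfold pvAdj pvBand
  rw [List.filter_append, List.filter_append]
  congr 1
  · congr 1
    · -- row i0 - 1
      unfold pvO
      by_cases h0 : i0 > 0
      · rw [if_pos (by push_cast; omega), if_pos h0]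
        have : ((i0 : Int) - 1 - ((0 : Nat) : Int)).toNat = i0 - 1 := by push_cast; omega
        rw [this, pv_getD_take nm (m + 1) (i0 - 1) [] (by omega)]
      · rw [if_neg (by push_cast; omega), if_neg h0]
        simp
    · -- row i0
      unfold pvO
      rw [if_pos (by push_cast; omega)]
      have : ((i0 : Int) - ((0 : Nat) : Int)).toNat = i0 := by push_cast; omega
      rw [this, pv_getD_take nm (m + 1) i0 [] (by omega)]
  · -- row i0 + 1
    unfold pvO
    rw [if_pos (by push_cast; omega)]
    have : ((i0 : Int) + 1 - ((0 : Nat) : Int)).toNat = i0 + 1 := by push_cast; omega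
    rw [this, pv_getD_take nm (m + 1) (i0 + 1) [] (by omega)]

-- == assembling B's bucket matrix ==

theorem pv_rows_H (sm : List (List (Int × Int × Int))) :
    ∀ (lst : List (List (Int × Int × Int))) (s : Nat)
      (bs : List (List (List (Int × Int × Int)))), pvH sm bs →
    pvH sm ((PySem.List.enumerate lst (s : Int)).foldl (fun bs q =>
        q.2.foldl (fun bs x =>
          (pvI sm.length q.1).foldl (fun bs i => bs.modify i.toNat (pvE sm x i)) bs) bs) bs) := by
  intro lst
  induction lst with
  | nil => intro s bs hH; simpa [PySem.List.enumerate] using hH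
  | cons nrow t ih =>
    intro s bs hH
    rw [PySem.List.enumerate_cons]
    simp only [List.foldl_cons]
    have hH' : pvH sm (nrow.foldl (fun bs x =>
        (pvI sm.length (s : Int)).foldl (fun bs i => bs.modify i.toNat (pvE sm x i)) bs) bs) := by
      induction nrow generalizing bs with
      | nil => exact hH
      | cons x xt ihx =>
        simp only [List.foldl_cons]
        exact ihx _ (pv_H_foldl_modify sm (pvE sm x) (fun i brow => pv_length_rowstep _ _ _) _ bs hH)
    have hcast : ((s : Int) + 1) = ((s + 1 : Nat) : Int) := by push_cast; ring
    rw [hcast]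
    exact ih (s + 1) _ hH'

def pvB0 (sm : List (List (Int × Int × Int))) : List (List (List (Int × Int × Int))) :=
  sm.map (fun row => row.map (fun _ => []))

theorem pv_B0_getD (sm : List (List (Int × Int × Int))) (i : Nat) :
    (pvB0 sm).getD i [] = (sm.getD i []).map (fun _ => []) := by
  unfold pvB0
  rw [List.getD_eq_getElem?_getD, List.getD_eq_getElem?_getD, List.getElem?_map]
  cases sm[i]? <;> simp

theorem pv_B0_H (sm : List (List (Int × Int × Int))) : pvH sm (pvB0 sm) := by
  constructor
  · simp [pvB0]
  · intro i
    rw [pv_B0_getD]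
    simp

theorem pv_scatter_eq_target (nm sm : List (List (Int × Int × Int))) :
    (PySem.List.enumerate (nm.take (sm.length + 1)) ((0 : Nat) : Int)).foldl (fun bs q =>
        q.2.foldl (fun bs x =>
          (pvI sm.length q.1).foldl (fun bs i => bs.modify i.toNat (pvE sm x i)) bs) bs)
        (pvB0 sm)
      = pvTarget nm sm := by
  set R := (PySem.List.enumerate (nm.take (sm.length + 1)) ((0 : Nat) : Int)).foldl (fun bs q =>
      q.2.foldl (fun bs x =>
        (pvI sm.length q.1).foldl (fun bs i => bs.modify i.toNat (pvE sm x i)) bs) bs)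
      (pvB0 sm) with hR
  have hH : pvH sm R := pv_rows_H sm _ 0 _ (pv_B0_H sm)
  have hlenR : R.length = sm.length := hH.1
  have hlenT : (pvTarget nm sm).length = sm.length := by simp [pvTarget]
  apply List.ext_getElem (by omega)
  intro i0 h1 h2
  have hi0 : i0 < sm.length := by omega
  have hTi0 : (pvTarget nm sm)[i0] = (sm.getD i0 []).map (fun s => pvAdj nm i0 s) := by
    unfold pvTarget
    rw [List.getElem_map, List.getElem_range]
  rw [hTi0]
  have hrowlen : R[i0].length = (sm.getD i0 []).length := by
    have := hH.2 i0
    rwa [List.getD_eq_getElem?_getD, List.getElem?_eq_getElem (by omega), Option.getD_some] at this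
  apply List.ext_getElem (by simpa using hrowlen)
  intro j0 hj1 hj2
  have hj0 : j0 < (sm.getD i0 []).length := by omega
  have hcell := pv_rows_cell sm i0 j0 hi0 hj0 (nm.take (sm.length + 1)) 0 (pvB0 sm) (pv_B0_H sm)
  rw [← hR] at hcell
  have hcell0 : ((pvB0 sm).getD i0 []).getD j0 [] = [] := by
    rw [pv_B0_getD]
    rw [List.getD_eq_getElem?_getD, List.getElem?_map]
    cases (sm.getD i0 [])[j0]? <;> simp
  rw [hcell0, List.nil_append, pv_sel_band nm _ i0 sm.length hi0] at hcell
  have hgetR : (R.getD i0 []).getD j0 [] = R[i0][j0] := by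
    rw [List.getD_eq_getElem R [] (show i0 < R.length by omega)]
    exact List.getD_eq_getElem R[i0] [] (show j0 < R[i0].length by omega)
  rw [hgetR] at hcell
  rw [hcell, List.getElem_map]
  congr 1
  rw [List.getD_eq_getElem (sm.getD i0 []) (0, 0, 0) hj0]

-- == A-side: A's fold produces the flattened filtered target ==

theorem pv_flatten_take3 {α : Type} (l : List (List α)) :
    (l.take 3).flatten = l.getD 0 [] ++ (l.getD 1 [] ++ l.getD 2 []) := by
  match l with
  | [] => simp
  | [a] => simp
  | [a, b] => simp
  | a :: b :: c :: t => simp [List.take, List.getD]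

theorem pv_getD_drop {α : Type} (l : List (List α)) (j k : Nat) :
    (l.drop j).getD k [] = l.getD (j + k) [] := by
  simp [List.getD_eq_getElem?_getD, List.getElem?_drop]

theorem pv_band_eq (nm : List (List (Int × Int × Int))) (k : Nat) :
    (PySem.List.slice nm (some (max 0 ((k : Int) - 1))) (some ((k : Int) + 2))).flatMap
        (fun r => r)
      = pvBand nm k := by
  cases k with
  | zero =>
    have h : PySem.List.slice nm (some (max 0 ((0 : Int) - 1))) (some ((0 : Int) + 2))
        = nm.take 2 := by
      have := PySem.List.slice_natCast (xs := nm) (a := 0) (b := 2)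
      push_cast at this
      simpa using this
    simp only [Nat.cast_zero]
    rw [h]
    have h2 : (nm.take 2).flatMap (fun r => r) = nm.getD 0 [] ++ nm.getD 1 [] := by
      match nm with
      | [] => simp
      | [a] => simp
      | a :: b :: t => simp [List.take, List.getD]
    rw [h2]
    simp [pvBand]
  | succ j =>
    have h : PySem.List.slice nm (some (max 0 ((↑(j + 1) : Int) - 1))) (some ((↑(j + 1) : Int) + 2))
        = (nm.drop j).take 3 := by
      have := PySem.List.slice_natCast (xs := nm) (a := j) (b := j + 3)
      push_cast at this ⊢
      simpa using this
    rw [h]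
    have h2 : ((nm.drop j).take 3).flatMap (fun r => r) = ((nm.drop j).take 3).flatten := by
      simp
    rw [h2, pv_flatten_take3, pv_getD_drop, pv_getD_drop, pv_getD_drop]
    simp [pvBand, List.append_assoc]

theorem pv_A_flat (nm : List (List (Int × Int × Int))) :
    ∀ (sm' : List (List (Int × Int × Int))) (s : Nat) (acc : List (List (Int × Int × Int))),
    (PySem.List.enumerate sm' (s : Int)).foldl
      (fun correct_numbers p =>
        let numbers := PySem.List.slice nm (some (max 0 (p.1 - 1))) (some (p.1 + 2))
        p.2.foldl
          (fun correct_numbers symbol =>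
            let possible_numbers := numbers.flatMap (fun number_aux => number_aux)
            let adjent_numbers := possible_numbers.filter
              (fun x => decide (symbol.2.1 ≥ x.2.1 - 1) && decide (symbol.2.1 ≤ x.2.2))
            if adjent_numbers.length > 1 then correct_numbers ++ [adjent_numbers]
            else correct_numbers)
          correct_numbers)
      acc
      = acc ++ (List.range sm'.length).flatMap (fun k =>
          ((sm'.getD k []).map (fun sym => pvAdj nm (s + k) sym)).filter
            (fun b => decide (b.length > 1))) := by
  intro sm'
  induction sm' with
  | nil => intro s acc; simp [PySem.List.enumerate]
  | cons hd tl ih =>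
    intro s acc
    rw [PySem.List.enumerate_cons]
    simp only [List.foldl_cons]
    have hinner : hd.foldl
        (fun correct_numbers symbol =>
          let possible_numbers := (PySem.List.slice nm (some (max 0 ((s : Int) - 1)))
            (some ((s : Int) + 2))).flatMap (fun number_aux => number_aux)
          let adjent_numbers := possible_numbers.filter
            (fun x => decide (symbol.2.1 ≥ x.2.1 - 1) && decide (symbol.2.1 ≤ x.2.2))
          if adjent_numbers.length > 1 then correct_numbers ++ [adjent_numbers]
          else correct_numbers)
        acc
        = acc ++ (hd.map (fun sym => pvAdj nm s sym)).filter (fun b => decide (b.length > 1)) := by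
      simp only [pv_band_eq nm s]
      have hpred : ∀ (symbol : Int × Int × Int),
          (pvBand nm s).filter
              (fun x => decide (symbol.2.1 ≥ x.2.1 - 1) && decide (symbol.2.1 ≤ x.2.2))
            = pvAdj nm s symbol := fun _ => rfl
      simp only [hpred]
      rw [PySem.List.foldl_append_ite (fun sym => (pvAdj nm s sym).length > 1)
        (fun sym => pvAdj nm s sym) hd acc]
      rw [List.filter_map]
      rfl
    rw [hinner]
    have hcast : ((s : Int) + 1) = ((s + 1 : Nat) : Int) := by push_cast; ring
    rw [hcast, ih (s + 1)]
    rw [List.length_cons, List.range_succ_eq_map, List.flatMap_cons, List.flatMap_map]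
    have hfn : (fun k => ((hd :: tl).getD (Nat.succ k) []).map (fun sym => pvAdj nm (s + Nat.succ k) sym)
          |>.filter (fun b => decide (b.length > 1)))
        = (fun k => ((tl.getD k []).map (fun sym => pvAdj nm (s + 1 + k) sym)).filter
            (fun b => decide (b.length > 1))) := by
      funext k
      rw [show (hd :: tl).getD (Nat.succ k) [] = tl.getD k [] from List.getD_cons_succ,
        show s + Nat.succ k = s + 1 + k by omega]
    rw [hfn]
    simp [List.append_assoc]

theorem pv_A_eq_target (nm sm : List (List (Int × Int × Int))) :
    get_adjents_numbers_star nm sm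
      = (pvTarget nm sm).flatten.filter (fun b => decide (b.length > 1)) := by
  unfold get_adjents_numbers_star
  rw [show PySem.List.enumerate sm 0 = PySem.List.enumerate sm ((0 : Nat) : Int) from rfl,
    pv_A_flat nm sm 0 []]
  rw [List.nil_append]
  unfold pvTarget
  rw [List.filter_flatten, List.map_map, ← List.flatMap_def]
  congr 1
  funext k
  rw [Function.comp_apply, Nat.zero_add]

-- == B-side bridge: the port's index lookups and hoisted modifies ==

theorem pv_index_getD (sm : List (List (Int × Int × Int))) (n : Nat) :
    (sm.map (fun row =>
        ((PySem.List.sorted ((PySem.List.enumerate row 0).map (fun p => (p.2.2.1, p.1)))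
            (fun q => q.1) false).map (fun q => q.1),
          (PySem.List.sorted ((PySem.List.enumerate row 0).map (fun p => (p.2.2.1, p.1)))
            (fun q => q.1) false).map (fun q => q.2)))).getD n ([], [])
      = ((pvPairs (sm.getD n [])).map (fun q => q.1),
          (pvPairs (sm.getD n [])).map (fun q => q.2)) := by
  rw [List.getD_eq_getElem?_getD, List.getElem?_map, List.getD_eq_getElem?_getD]
  cases h : sm[n]? with
  | none => rfl
  | some row => rfl

theorem pv_B_eq_target (nm sm : List (List (Int × Int × Int))) :
    get_adjents_numbers_star_alt nm sm
      = (pvTarget nm sm).flatten.filter (fun b => decide (b.length > 1)) := by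
  unfold get_adjents_numbers_star_alt
  simp only [pv_index_getD]
  simp only [pv_modfold]
  rw [show ((sm.length : Int) + 1) = ((sm.length + 1 : Nat) : Int) by push_cast; ring,
    PySem.List.slice_to_natCast]
  rw [← pv_scatter_eq_target nm sm]
  rfl

-- ===== VERDICT (by name: the statement is the Claim_ definition above) =====
theorem get_adjents_numbers_star_spec : Claim_equal_get_adjents_numbers_star := by
  intro nm sm _
  show get_adjents_numbers_star nm sm = get_adjents_numbers_star_alt nm sm
  rw [pv_A_eq_target, pv_B_eq_target]
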